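-- pv_equiv track=rewrite | github.com/olivershetler/en-605-202-lab1 | main.py | validate_infix_structure
-- ===== SOURCE A (Python) =====
-- def validate_infix_structure(expr):
--     """Basic validation of infix expression structure"""
--     try:
--         # Check for operator between operands
--         tokens = [c for c in expr if c not in '()']
--         for i in range(len(tokens)-1):
--             if tokens[i].isalnum() and tokens[i+1].isalnum():
--                 return False
--             if (tokens[i] in '+-*/^') and (tokens[i+1] in '+-*/^'):
--                 return False
--         return True
--     except:
--         return False
-- ===== SOURCE B (Python) =====
-- def validate_infix_structure(expr):
--     """Basic validation of infix expression structure (classify-then-substring-scan)."""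
--     try:
--         cats = ''.join(
--             'A' if c.isalnum() else ('O' if c in '+-*/^' else '.')
--             for c in expr if c not in '()'
--         )
--         return not ('AA' in cats or 'OO' in cats)
--     except:
--         return False
-- ===== Notes on version B (the rewrite author's own statement) =====
-- stated objective: simpler
-- what changed: Replaces the indexed adjacent-pair loop with a classify-each-character-into-a-category-string pass followed by a substring search for the forbidden patterns 'AA' and 'OO'.
import Mathlib
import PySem

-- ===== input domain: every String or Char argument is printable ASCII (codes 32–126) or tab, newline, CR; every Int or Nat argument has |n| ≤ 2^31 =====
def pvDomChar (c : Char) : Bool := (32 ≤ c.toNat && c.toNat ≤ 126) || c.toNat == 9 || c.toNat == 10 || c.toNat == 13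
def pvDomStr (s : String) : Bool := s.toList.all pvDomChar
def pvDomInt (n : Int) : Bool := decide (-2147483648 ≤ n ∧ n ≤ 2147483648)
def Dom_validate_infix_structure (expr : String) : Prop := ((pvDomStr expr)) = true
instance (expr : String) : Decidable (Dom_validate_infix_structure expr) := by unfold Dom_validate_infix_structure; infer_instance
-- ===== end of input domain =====

-- B replaces A's indexed adjacent-pair loop by mapping each non-paren character to a
-- category character ('A'/'O'/'.') and searching the category string for "AA"/"OO"; objective: simpler.


-- ===== PORT A =====
-- c.isalnum() on a one-character string
def pvIsAl (c : Char) : Bool := PySem.Chars.strIsalnum [c]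
-- c in '+-*/^' (single-character membership)
def pvIsOp (c : Char) : Bool := c == '+' || c == '-' || c == '*' || c == '/' || c == '^'

-- A's `for i in range(len(tokens)-1)` loop over the index list; indices produced by
-- pyRange are always in range here, so the pyGetD default is never read
def pvALoop (tokens : List Char) : List Int → Bool
  | [] => true
  | i :: rest =>
    let a := PySem.List.pyGetD tokens i ' '
    let b := PySem.List.pyGetD tokens (i + 1) ' '
    if pvIsAl a && pvIsAl b then false
    else if pvIsOp a && pvIsOp b then false
    else pvALoop tokens rest

def validate_infix_structure (expr : String) : Bool :=
  let tokens := expr.toList.filter (fun c => !(c == '(' || c == ')'))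
  pvALoop tokens (PySem.List.pyRange 0 ((tokens.length : Int) - 1) 1)

-- ===== PORT B =====
-- category of one character: 'A' = alnum, 'O' = operator, '.' = neutral
def pvCat (c : Char) : Char :=
  if PySem.Chars.strIsalnum [c] then 'A'
  else if c == '+' || c == '-' || c == '*' || c == '/' || c == '^' then 'O'
  else '.'

def validate_infix_structure_alt (expr : String) : Bool :=
  let cats := (expr.toList.filter (fun c => !(c == '(' || c == ')'))).map pvCat
  !(PySem.Chars.isIn ['A', 'A'] cats || PySem.Chars.isIn ['O', 'O'] cats)

-- ===== PRECONDITION & SPEC =====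
def Spec_validate_infix_structure (expr : String) (out : Bool) : Prop := out = validate_infix_structure_alt expr
instance (expr : String) (out : Bool) : Decidable (Spec_validate_infix_structure expr out) := by unfold Spec_validate_infix_structure; infer_instance

-- ===== CLAIM (what is proved, stated in full; the proofs are below) =====
def Claim_equal_validate_infix_structure : Prop := ∀ (expr : String), Dom_validate_infix_structure expr → Spec_validate_infix_structure expr (validate_infix_structure expr)

-- ===== LEMMAS AND PROOFS =====

-- reference checker: no adjacent bad pair, by structural recursion on the token list
def pvChk : List Char → Bool
  | a :: b :: r => !((pvIsAl a && pvIsAl b) || (pvIsOp a && pvIsOp b)) && pvChk (b :: r)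
  | _ => true

theorem op_not_al (c : Char) (h : pvIsOp c = true) : pvIsAl c = false := by
  unfold pvIsOp at h
  simp only [Bool.or_eq_true, beq_iff_eq, or_assoc] at h
  rcases h with h | h | h | h | h <;> subst h <;> decide

theorem catA (c : Char) : (pvCat c == 'A') = pvIsAl c := by
  unfold pvCat pvIsAl
  split_ifs with h1 h2 <;> simp [h1]

theorem catO (c : Char) : (pvCat c == 'O') = pvIsOp c := by
  unfold pvCat
  split_ifs with h1 h2
  · rcases hop : pvIsOp c
    · simp
    · have := op_not_al c hop
      unfold pvIsAl at this
      simp [this] at h1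
  · unfold pvIsOp
    simp [h2]
  · unfold pvIsOp
    simp [h2]

theorem isIn_pair_nil (u v : Char) : PySem.Chars.isIn [u, v] [] = false := by
  rw [PySem.Chars.isIn_eq_false_iff]
  intro h
  have := h.length_le
  simp at this

theorem isIn_pair_singleton (u v a : Char) : PySem.Chars.isIn [u, v] [a] = false := by
  rw [PySem.Chars.isIn_eq_false_iff]
  intro h
  have := h.length_le
  simp at this

theorem isIn_pair_cons (u v a b : Char) (r : List Char) :
    PySem.Chars.isIn [u, v] (a :: b :: r) =
      ((a == u && b == v) || PySem.Chars.isIn [u, v] (b :: r)) := by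
  rw [Bool.eq_iff_iff]
  simp [PySem.Chars.isIn_iff_infix, List.infix_cons_iff, List.cons_prefix_cons]
  tauto

theorem not_or_or (x y t1 t2 : Bool) :
    (!((x || t1) || (y || t2))) = (!(x || y) && !(t1 || t2)) := by
  cases x <;> cases y <;> cases t1 <;> cases t2 <;> rfl

theorem alt_eq_chk (l : List Char) :
    (!(PySem.Chars.isIn ['A', 'A'] (l.map pvCat) || PySem.Chars.isIn ['O', 'O'] (l.map pvCat))) = pvChk l := by
  induction l using pvChk.induct with
  | case1 a b r ih =>
    simp only [List.map_cons] at ih ⊢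
    rw [isIn_pair_cons, isIn_pair_cons, catA a, catA b, catO a, catO b, not_or_or, ih]
    simp only [pvChk]
  | case2 l h =>
    match l, h with
    | [], _ => simp [pvChk, isIn_pair_nil]
    | [a], _ => simp [pvChk, isIn_pair_singleton]
    | a :: b :: r, h => exact absurd rfl (fun heq => h a b r heq)

theorem chk_short (l : List Char) (h : l.length ≤ 1) : pvChk l = true := by
  match l with
  | [] => rfl
  | [a] => rfl
  | a :: b :: r => simp at h

theorem if_chain (x y z : Bool) : (if x then false else if y then false else z) = (!(x || y) && z) := by
  cases x <;> cases y <;> rfl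

theorem loop_drop (tokens : List Char) (n : Nat) :
    ∀ k : Nat, tokens.length - k = n →
    pvALoop tokens (PySem.List.pyRange (k : Int) ((tokens.length : Int) - 1) 1) = pvChk (tokens.drop k) := by
  induction n with
  | zero =>
    intro k hk
    rw [PySem.List.pyRange_one_eq_nil (by omega)]
    rw [List.drop_eq_nil_of_le (by omega)]
    rfl
  | succ n ih =>
    intro k hk
    by_cases h : k + 1 < tokens.length
    · rw [PySem.List.pyRange_one_cons (by omega)]
      have e1 : ((k : Int) + 1) = ((k + 1 : Nat) : Int) := by push_cast; ring
      simp only [pvALoop, e1, PySem.List.pyGetD_natCast]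
      rw [List.getD_eq_getElem _ _ (by omega), List.getD_eq_getElem _ _ h]
      rw [ih (k + 1) (by omega)]
      rw [List.drop_eq_getElem_cons (show k < tokens.length by omega),
          List.drop_eq_getElem_cons h]
      simp only [pvChk, if_chain]
    · rw [PySem.List.pyRange_one_eq_nil (by omega)]
      rw [chk_short _ (by rw [List.length_drop]; omega)]
      rfl

theorem pvALoop_eq_chk (tokens : List Char) :
    pvALoop tokens (PySem.List.pyRange 0 ((tokens.length : Int) - 1) 1) = pvChk tokens := by
  have := loop_drop tokens tokens.length 0 (by omega)
  simpa using this

-- ===== VERDICT (by name: the statement is the Claim_ definition above) =====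
theorem validate_infix_structure_spec : Claim_equal_validate_infix_structure := by
  intro expr _
  unfold Spec_validate_infix_structure validate_infix_structure validate_infix_structure_alt
  rw [pvALoop_eq_chk, alt_eq_chk]
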